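-- pv_equiv track=rewrite | github.com/yohan020/baekjoon | atcoder/daily_training/2026.02.04_MEDIUM/E.py | solve
-- ===== SOURCE A (Python) =====
-- from bisect import bisect_right, bisect_left
--
-- def solve(N, M, A, B):
--     A.sort()
--     B.sort()
--     low = 1
--     ans = 0
--     high = 10**9 + 1
--     while low <= high:
--         mid = (low + high) // 2
--         # bisect_right는 mid 보다 첫 큰 위치를 반환
--         seller_cnt = bisect_right(A, mid)
--         # bisect_left는 mid 보다 크거나 같은 첫 위치
--         buyer_cnt = M - bisect_left(B, mid)
--
--         if seller_cnt >= buyer_cnt: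
--             ans = mid
--             high = mid - 1
--         else:
--             low = mid + 1
--     return ans
-- ===== SOURCE B (Python) =====
-- def solve(N, M, A, B):
--     # Forward crossing scan: f(X) = #(A <= X) - (M - #(B < X)) is non-decreasing and
--     # only changes at X = a (a in A) or X = b+1 (b in B); sweep those candidates in
--     # increasing order with two consumed sorted lists instead of binary-searching.
--     H = 10 ** 9 + 1
--     sa = sorted(A)
--     sb = sorted(B)
--     cands = sorted({x for x in [1] + sa + [b + 1 for b in sb] if 1 <= x <= H})
--     seller = 0
--     buyer = M
--     for c in cands:
--         while sa and sa[0] <= c: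
--             del sa[0]
--             seller += 1
--         while sb and sb[0] < c:
--             del sb[0]
--             buyer -= 1
--         if seller >= buyer:
--             return c
--     return 0
-- ===== Notes on version B (the rewrite author's own statement) =====
-- stated objective: alternative
-- what changed: Replaces A's binary search over the answer space (re-probing both lists with bisect at every midpoint) by a single forward sweep over the sorted candidate prices {1} U A U {b+1 : b in B}, maintaining seller/buyer counts with two consumed sorted lists and returning at the first crossing; B also does not mutate its list arguments, while A sorts them in place.
import Mathlib
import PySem

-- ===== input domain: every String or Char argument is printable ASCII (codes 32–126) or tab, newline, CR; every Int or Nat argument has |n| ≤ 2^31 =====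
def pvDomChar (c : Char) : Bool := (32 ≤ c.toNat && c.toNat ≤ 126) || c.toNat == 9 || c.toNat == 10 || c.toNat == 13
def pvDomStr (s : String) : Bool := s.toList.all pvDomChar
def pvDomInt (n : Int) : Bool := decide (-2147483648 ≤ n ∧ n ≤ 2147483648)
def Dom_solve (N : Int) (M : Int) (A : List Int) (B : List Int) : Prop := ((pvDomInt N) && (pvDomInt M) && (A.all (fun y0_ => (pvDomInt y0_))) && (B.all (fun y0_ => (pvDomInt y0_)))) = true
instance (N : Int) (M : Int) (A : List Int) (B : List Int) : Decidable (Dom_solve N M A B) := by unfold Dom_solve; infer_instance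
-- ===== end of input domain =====

-- B replaces A's answer-space binary search (bisect probes each step) by a single forward
-- sweep over the sorted candidate prices {1} ∪ A ∪ {b+1 : b ∈ B}, consuming the two sorted
-- lists; same return value, different algorithm (A also sorts its list arguments in place,
-- B does not — the equivalence proved here is about the return value).

-- ===== PORT A =====
-- while low <= high: mid = (low+high)//2; counts via bisect on the (sorted) lists
def solveLoop (sa sb : List Int) (M low high ans : Int) : Int :=
  if h : low ≤ high then
    let mid := PySem.Int.floordiv (low + high) 2
    let sellerCnt : Int := (PySem.List.bisectRight sa mid : Int)
    let buyerCnt : Int := M - (PySem.List.bisectLeft sb mid : Int)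
    if sellerCnt ≥ buyerCnt then solveLoop sa sb M low (mid - 1) mid
    else solveLoop sa sb M (mid + 1) high ans
  else ans
termination_by (high + 1 - low).toNat
decreasing_by
  · have hm := PySem.Int.floordiv_two_mid_bounds h; omega
  · have hm := PySem.Int.floordiv_two_mid_bounds h; omega

def solve (N : Int) (M : Int) (A : List Int) (B : List Int) : Int :=
  let sa := PySem.List.sorted A (fun x => x) false   -- A.sort()
  let sb := PySem.List.sorted B (fun x => x) false   -- B.sort()
  solveLoop sa sb M 1 (10 ^ 9 + 1) 0

-- ===== PORT B =====
-- while sa and sa[0] <= c: del sa[0]; seller += 1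
def sellAdv : List Int → Int → Int → List Int × Int
  | [], _, seller => ([], seller)
  | a :: rest, c, seller =>
    if a ≤ c then sellAdv rest c (seller + 1) else (a :: rest, seller)

-- while sb and sb[0] < c: del sb[0]; buyer -= 1
def buyAdv : List Int → Int → Int → List Int × Int
  | [], _, buyer => ([], buyer)
  | b :: rest, c, buyer =>
    if b < c then buyAdv rest c (buyer - 1) else (b :: rest, buyer)

-- for c in cands: … ; if seller >= buyer: return c // return 0
def sweep : List Int → List Int → List Int → Int → Int → Int
  | [], _, _, _, _ => 0
  | c :: cs, sa, sb, seller, buyer =>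
    let p := sellAdv sa c seller
    let q := buyAdv sb c buyer
    if p.2 ≥ q.2 then c else sweep cs p.1 q.1 p.2 q.2

def solve_alt (N : Int) (M : Int) (A : List Int) (B : List Int) : Int :=
  let H : Int := 10 ^ 9 + 1
  let sa := PySem.List.sorted A (fun x => x) false
  let sb := PySem.List.sorted B (fun x => x) false
  let cands := PySem.List.sorted
    (PySem.Set.ofList ((1 :: (sa ++ sb.map (fun b => b + 1))).filter
      (fun x => decide (1 ≤ x) && decide (x ≤ H)))) (fun x => x) false
  sweep cands sa sb 0 M

-- ===== PRECONDITION & SPEC =====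
def Spec_solve (N : Int) (M : Int) (A : List Int) (B : List Int) (out : Int) : Prop := out = solve_alt N M A B
instance (N : Int) (M : Int) (A : List Int) (B : List Int) (out : Int) : Decidable (Spec_solve N M A B out) := by unfold Spec_solve; infer_instance

-- ===== CLAIM (what is proved, stated in full; the proofs are below) =====
def Claim_equal_solve : Prop := ∀ (N : Int) (M : Int) (A : List Int) (B : List Int), Dom_solve N M A B → Spec_solve N M A B (solve N M A B)

-- ===== LEMMAS AND PROOFS =====

-- seller ≥ buyer at price x, counted on the sorted lists via bisect (A's test)
def predC (sa sb : List Int) (M x : Int) : Prop :=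
  M - (PySem.List.bisectLeft sb x : Int) ≤ (PySem.List.bisectRight sa x : Int)

theorem bisect_count_core (xs : List Int) (p : Int → Bool) (k : Nat)
    (hk : k ≤ xs.length)
    (h1 : ∀ (j : Nat) (hj : j < xs.length), j < k → p xs[j] = true)
    (h2 : ∀ (j : Nat) (hj : j < xs.length), k ≤ j → ¬ p xs[j] = true) :
    xs.countP p = k := by
  conv_lhs => rw [← List.take_append_drop k xs]
  rw [List.countP_append]
  have ht : (xs.take k).countP p = (xs.take k).length := by
    rw [List.countP_eq_length]
    intro a ha
    obtain ⟨j, hm, he⟩ := List.mem_take_iff_getElem.1 ha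
    subst he
    exact h1 j (by omega) (by omega)
  have hd : (xs.drop k).countP p = 0 := by
    rw [List.countP_eq_zero]
    intro a ha
    obtain ⟨j, hm, he⟩ := List.mem_drop_iff_getElem.1 ha
    subst he
    exact h2 (k + j) (by omega) (by omega)
  rw [ht, hd, List.length_take]
  omega

-- on a sorted list, bisect_right x = count of elements ≤ x
theorem bisectRight_eq_countP (xs : List Int) (x : Int)
    (hs : xs.Pairwise (· ≤ ·)) :
    PySem.List.bisectRight xs x = xs.countP (fun a => decide (a ≤ x)) := by
  obtain ⟨hk, h1, h2⟩ := PySem.List.bisectRight_spec xs x hs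
  exact (bisect_count_core xs _ _ hk
    (fun j hj hjk => by simpa using h1 j hj hjk)
    (fun j hj hjk => by simpa using not_le.2 (h2 j hj hjk))).symm

-- on a sorted list, bisect_left x = count of elements < x
theorem bisectLeft_eq_countP (xs : List Int) (x : Int)
    (hs : xs.Pairwise (· ≤ ·)) :
    PySem.List.bisectLeft xs x = xs.countP (fun a => decide (a < x)) := by
  obtain ⟨hk, h1, h2⟩ := PySem.List.bisectLeft_spec xs x hs
  exact (bisect_count_core xs _ _ hk
    (fun j hj hjk => by simpa using h1 j hj hjk)
    (fun j hj hjk => by simpa using not_lt.2 (h2 j hj hjk))).symm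

theorem predC_iff_counts (sa sb : List Int) (M x : Int)
    (hsa : sa.Pairwise (· ≤ ·)) (hsb : sb.Pairwise (· ≤ ·)) :
    predC sa sb M x ↔
      M - (sb.countP (fun b => decide (b < x)) : Int) ≤ (sa.countP (fun a => decide (a ≤ x)) : Int) := by
  unfold predC
  rw [bisectRight_eq_countP sa x hsa, bisectLeft_eq_countP sb x hsb]

theorem predC_mono (sa sb : List Int) (M x y : Int)
    (hsa : sa.Pairwise (· ≤ ·)) (hsb : sb.Pairwise (· ≤ ·))
    (hxy : x ≤ y) (h : predC sa sb M x) : predC sa sb M y := by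
  rw [predC_iff_counts sa sb M x hsa hsb] at h
  rw [predC_iff_counts sa sb M y hsa hsb]
  have h1 : sa.countP (fun a => decide (a ≤ x)) ≤ sa.countP (fun a => decide (a ≤ y)) :=
    List.countP_mono_left (by intro a _ ha; simp_all; omega)
  have h2 : sb.countP (fun b => decide (b < x)) ≤ sb.countP (fun b => decide (b < y)) :=
    List.countP_mono_left (by intro a _ ha; simp_all; omega)
  omega

-- A's loop returns ans when the predicate fails on the whole interval
theorem solveLoop_none (sa sb : List Int) (M : Int) :
    ∀ low high ans, (∀ x, low ≤ x → x ≤ high → ¬ predC sa sb M x) →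
      solveLoop sa sb M low high ans = ans := by
  intro low high ans
  fun_induction solveLoop sa sb M low high ans with
  | case1 low high ans h mid sc bc hcond ih =>
    intro hall
    exfalso
    have hm := PySem.Int.floordiv_two_mid_bounds h
    exact hall mid (by omega) (by omega) (by unfold predC; omega)
  | case2 low high ans h mid sc bc hcond ih =>
    intro hall
    apply ih
    intro x hx1 hx2
    exact hall x (by have := PySem.Int.floordiv_two_mid_bounds h; omega) hx2
  | case3 low high ans h =>
    intro _; rfl

-- A's loop returns the least x in [low, high] satisfying the predicate, when one exists
theorem solveLoop_found (sa sb : List Int) (M : Int)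
    (hsa : sa.Pairwise (· ≤ ·)) (hsb : sb.Pairwise (· ≤ ·)) :
    ∀ low high ans, low ≤ high → predC sa sb M high →
      (low ≤ solveLoop sa sb M low high ans ∧ solveLoop sa sb M low high ans ≤ high ∧
       predC sa sb M (solveLoop sa sb M low high ans) ∧
       ∀ x, low ≤ x → x < solveLoop sa sb M low high ans → ¬ predC sa sb M x) := by
  intro low high ans
  fun_induction solveLoop sa sb M low high ans with
  | case1 low high ans h mid sc bc hcond ih =>
    intro _ hph
    have hm := PySem.Int.floordiv_two_mid_bounds h
    have hpm : predC sa sb M mid := by unfold predC; omega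
    by_cases hrec : low ≤ mid - 1 ∧ predC sa sb M (mid - 1)
    · obtain ⟨h1, h2, h3, h4⟩ := ih hrec.1 hrec.2
      exact ⟨h1, by omega, h3, h4⟩
    · rw [not_and_or] at hrec
      have hnone : ∀ x, low ≤ x → x ≤ mid - 1 → ¬ predC sa sb M x := by
        intro x hx1 hx2 hpx
        rcases hrec with hr | hr
        · omega
        · exact hr (predC_mono sa sb M x (mid - 1) hsa hsb (by omega) hpx)
      rw [solveLoop_none sa sb M low (mid - 1) mid hnone]
      exact ⟨by omega, by omega, hpm, by intro x hx1 hx2; exact hnone x hx1 (by omega)⟩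
  | case2 low high ans h mid sc bc hcond ih =>
    intro _ hph
    have hm := PySem.Int.floordiv_two_mid_bounds h
    have hnm : ¬ predC sa sb M mid := by unfold predC; omega
    have hmh : mid < high := by
      rcases lt_or_eq_of_le hm.2 with h' | h'
      · exact h'
      · exfalso; apply hnm
        show predC sa sb M (PySem.Int.floordiv (low + high) 2)
        rw [h']; exact hph
    obtain ⟨h1, h2, h3, h4⟩ := ih (by omega) hph
    refine ⟨by omega, h2, h3, ?_⟩
    intro x hx1 hx2 hpx
    by_cases hxm : x ≤ mid
    · exact hnm (predC_mono sa sb M x mid hsa hsb hxm hpx)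
    · exact h4 x (by omega) hx2 hpx
  | case3 low high ans h =>
    intro hlh _
    omega

-- advancing a pointer over a sorted list counts exactly the elements ≤ c (resp. < c)
theorem sellAdv_eq (c : Int) : ∀ (sa : List Int) (seller : Int), sa.Pairwise (· ≤ ·) →
    sellAdv sa c seller =
      (sa.dropWhile (fun a => decide (a ≤ c)), seller + (sa.countP (fun a => decide (a ≤ c)) : Int)) := by
  intro sa
  induction sa with
  | nil => intro seller _; simp [sellAdv]
  | cons a rest ih =>
    intro seller hp
    rw [List.pairwise_cons] at hp
    by_cases hac : a ≤ c
    · rw [sellAdv, if_pos hac, ih _ hp.2]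
      simp [hac, List.countP_cons]
      ring
    · rw [sellAdv, if_neg hac]
      have hz : (a :: rest).countP (fun x => decide (x ≤ c)) = 0 := by
        rw [List.countP_eq_zero]
        intro x hx
        rcases List.mem_cons.1 hx with h | h
        · simp [h]; omega
        · have := hp.1 x h; simp; omega
      simp [hac, hz]

theorem buyAdv_eq (c : Int) : ∀ (sb : List Int) (buyer : Int), sb.Pairwise (· ≤ ·) →
    buyAdv sb c buyer =
      (sb.dropWhile (fun b => decide (b < c)), buyer - (sb.countP (fun b => decide (b < c)) : Int)) := by
  intro sb
  induction sb with
  | nil => intro buyer _; simp [buyAdv]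
  | cons b rest ih =>
    intro buyer hp
    rw [List.pairwise_cons] at hp
    by_cases hbc : b < c
    · rw [buyAdv, if_pos hbc, ih _ hp.2]
      simp [hbc, List.countP_cons]
      ring
    · rw [buyAdv, if_neg hbc]
      have hz : (b :: rest).countP (fun x => decide (x < c)) = 0 := by
        rw [List.countP_eq_zero]
        intro x hx
        rcases List.mem_cons.1 hx with h | h
        · simp [h]; omega
        · have := hp.1 x h; simp; omega
      simp [hbc, hz]

-- splitting a count over a sorted list at an earlier threshold
theorem countP_split_le (sa : List Int) (c c' : Int) (hcc : c ≤ c')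
    (hsa : sa.Pairwise (· ≤ ·)) :
    sa.countP (fun a => decide (a ≤ c')) =
      sa.countP (fun a => decide (a ≤ c)) +
        (sa.dropWhile (fun a => decide (a ≤ c))).countP (fun a => decide (a ≤ c')) := by
  induction sa with
  | nil => simp
  | cons a rest ih =>
    rw [List.pairwise_cons] at hsa
    by_cases hac : a ≤ c
    · simp [List.countP_cons, hac, ih hsa.2]
      have : a ≤ c' := le_trans hac hcc
      simp [this]; omega
    · have hz : (a :: rest).countP (fun x => decide (x ≤ c)) = 0 := by
        rw [List.countP_eq_zero]
        intro x hx
        rcases List.mem_cons.1 hx with h | h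
        · simp [h]; omega
        · have := hsa.1 x h; simp; omega
      simp [hz, hac]

theorem countP_split_lt (sb : List Int) (c c' : Int) (hcc : c ≤ c')
    (hsb : sb.Pairwise (· ≤ ·)) :
    sb.countP (fun b => decide (b < c')) =
      sb.countP (fun b => decide (b < c)) +
        (sb.dropWhile (fun b => decide (b < c))).countP (fun b => decide (b < c')) := by
  induction sb with
  | nil => simp
  | cons b rest ih =>
    rw [List.pairwise_cons] at hsb
    by_cases hbc : b < c
    · simp [List.countP_cons, hbc, ih hsb.2]
      have : b < c' := lt_of_lt_of_le hbc hcc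
      simp [this]; omega
    · have hz : (b :: rest).countP (fun x => decide (x < c)) = 0 := by
        rw [List.countP_eq_zero]
        intro x hx
        rcases List.mem_cons.1 hx with h | h
        · simp [h]; omega
        · have := hsb.1 x h; simp; omega
      simp [hz, hbc]

-- the sweep returns the first candidate where seller ≥ buyer, else 0
theorem sweep_eq_find (SA TB : Int → Int) :
    ∀ (cands sa sb : List Int) (seller buyer : Int),
      sa.Pairwise (· ≤ ·) → sb.Pairwise (· ≤ ·) → cands.Pairwise (· ≤ ·) →
      (∀ c ∈ cands, seller + (sa.countP (fun a => decide (a ≤ c)) : Int) = SA c) →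
      (∀ c ∈ cands, buyer - (sb.countP (fun b => decide (b < c)) : Int) = TB c) →
      sweep cands sa sb seller buyer =
        (cands.find? (fun c => decide (TB c ≤ SA c))).getD 0 := by
  intro cands
  induction cands with
  | nil => intro sa sb seller buyer _ _ _ _ _; simp [sweep]
  | cons c cs ih =>
    intro sa sb seller buyer hsa hsb hcands hS hT
    rw [List.pairwise_cons] at hcands
    have hSc := hS c (by simp)
    have hTc := hT c (by simp)
    rw [sweep, sellAdv_eq c sa seller hsa, buyAdv_eq c sb buyer hsb]
    simp only [List.find?_cons]
    by_cases hcond : TB c ≤ SA c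
    · rw [if_pos (by omega)]
      simp [hcond]
    · rw [if_neg (by omega)]
      have hd : decide (TB c ≤ SA c) = false := by simp [hcond]
      rw [hd]
      apply ih
      · exact hsa.sublist (List.dropWhile_sublist _)
      · exact hsb.sublist (List.dropWhile_sublist _)
      · exact hcands.2
      · intro c' hc'
        have hcc : c ≤ c' := hcands.1 c' hc'
        have := countP_split_le sa c c' hcc hsa
        have hS' := hS c' (by simp [hc'])
        push_cast [this] at hS' ⊢
        omega
      · intro c' hc'
        have hcc : c ≤ c' := hcands.1 c' hc'
        have := countP_split_lt sb c c' hcc hsb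
        have hT' := hT c' (by simp [hc'])
        push_cast [this] at hT' ⊢
        omega

theorem find?_first_min (p : Int → Bool) :
    ∀ (l : List Int), l.Pairwise (· ≤ ·) → ∀ r, l.find? p = some r →
      p r = true ∧ r ∈ l ∧ ∀ c ∈ l, p c = true → r ≤ c := by
  intro l
  induction l with
  | nil => simp
  | cons a rest ih =>
    intro hp r hr
    rw [List.pairwise_cons] at hp
    by_cases hpa : p a
    · rw [List.find?_cons_of_pos hpa] at hr
      injection hr with hr; subst hr
      refine ⟨hpa, by simp, ?_⟩
      intro c hc _
      rcases List.mem_cons.1 hc with h | h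
      · omega
      · exact hp.1 c h
    · rw [List.find?_cons_of_neg (by simp [hpa])] at hr
      obtain ⟨h1, h2, h3⟩ := ih hp.2 r hr
      refine ⟨h1, by simp [h2], ?_⟩
      intro c hc hpc
      rcases List.mem_cons.1 hc with h | h
      · subst h; exact absurd hpc (by simp [hpa])
      · exact h3 c h hpc

theorem exists_list_max : ∀ (l : List Int), l ≠ [] → ∃ c ∈ l, ∀ y ∈ l, y ≤ c := by
  intro l
  induction l with
  | nil => simp
  | cons a rest ih =>
    intro _
    rcases eq_or_ne rest [] with h | h
    · subst h; exact ⟨a, by simp⟩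
    · obtain ⟨c, hc, hmax⟩ := ih h
      by_cases hca : c ≤ a
      · exact ⟨a, by simp, by
          intro y hy
          rcases List.mem_cons.1 hy with h | h
          · omega
          · exact le_trans (hmax y h) hca⟩
      · exact ⟨c, by simp [hc], by
          intro y hy
          rcases List.mem_cons.1 hy with h | h
          · omega
          · exact hmax y h⟩

-- the crossing function only changes at candidate prices: below any x with seller ≥ buyer
-- there is a candidate price with the same counts
theorem reduction (M : Int) (sa sb : List Int)
    (hsa : sa.Pairwise (· ≤ ·)) (hsb : sb.Pairwise (· ≤ ·)) (x : Int)
    (hx1 : 1 ≤ x) (hxH : x ≤ 10 ^ 9 + 1) (hpx : predC sa sb M x) :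
    ∃ c ∈ PySem.List.sorted
        (PySem.Set.ofList ((1 :: (sa ++ sb.map (fun b => b + 1))).filter
          (fun y => decide (1 ≤ y) && decide (y ≤ (10 ^ 9 + 1 : Int))))) (fun y => y) false,
      c ≤ x ∧ predC sa sb M c := by
  set H : Int := 10 ^ 9 + 1 with hHdef
  set L : List Int := (1 :: (sa ++ sb.map (fun b => b + 1))).filter
      (fun y => decide (1 ≤ y) && decide (y ≤ H)) with hLdef
  set cands : List Int := PySem.List.sorted (PySem.Set.ofList L) (fun y => y) false with hCdef
  have mem_cands : ∀ y : Int, y ∈ cands ↔ y ∈ L := by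
    intro y
    rw [hCdef, PySem.List.mem_sorted, PySem.Set.mem_ofList]
  have mem_L : ∀ y : Int, y ∈ L ↔
      ((y = 1 ∨ y ∈ sa ∨ ∃ b ∈ sb, b + 1 = y) ∧ (1 ≤ y ∧ y ≤ H)) := by
    intro y
    rw [hLdef]
    simp [List.mem_filter, List.mem_cons, List.mem_append, List.mem_map, and_assoc]
  have hHx : (1:Int) ≤ H := by rw [hHdef]; norm_num
  have h1c : (1:Int) ∈ cands := by
    rw [mem_cands, mem_L]; exact ⟨Or.inl rfl, le_refl 1, hHx⟩
  set l : List Int := cands.filter (fun c => decide (c ≤ x)) with hldef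
  have h1l : (1:Int) ∈ l := by
    rw [hldef, List.mem_filter]; exact ⟨h1c, by simpa using hx1⟩
  obtain ⟨c, hcl, hcmax⟩ := exists_list_max l (List.ne_nil_of_mem h1l)
  rw [hldef, List.mem_filter] at hcl
  have hc_cands : c ∈ cands := hcl.1
  have hc_le : c ≤ x := by simpa using hcl.2
  have hc1 : 1 ≤ c := ((mem_L c).1 ((mem_cands c).1 hc_cands)).2.1
  have hmem_l : ∀ y : Int, y ∈ cands → y ≤ x → y ≤ c := by
    intro y hy hyx
    exact hcmax y (by rw [hldef, List.mem_filter]; exact ⟨hy, by simpa using hyx⟩)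
  have hA : sa.countP (fun a => decide (a ≤ x)) = sa.countP (fun a => decide (a ≤ c)) := by
    apply List.countP_congr
    intro a ha
    simp only [decide_eq_true_eq]
    constructor
    · intro hax
      by_contra hac
      have hac' : c < a := by omega
      have haC : a ∈ cands := by
        rw [mem_cands, mem_L]
        exact ⟨Or.inr (Or.inl ha), by omega, by omega⟩
      have := hmem_l a haC hax
      omega
    · intro h; omega
  have hB : sb.countP (fun b => decide (b < x)) = sb.countP (fun b => decide (b < c)) := by
    apply List.countP_congr
    intro b hb
    simp only [decide_eq_true_eq]
    constructor
    · intro hbx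
      by_contra hbc
      have hbc' : c ≤ b := by omega
      have hbC : b + 1 ∈ cands := by
        rw [mem_cands, mem_L]
        exact ⟨Or.inr (Or.inr ⟨b, hb, rfl⟩), by omega, by omega⟩
      have := hmem_l (b + 1) hbC (by omega)
      omega
    · intro h; omega
  refine ⟨c, hc_cands, hc_le, ?_⟩
  rw [predC_iff_counts sa sb M c hsa hsb]
  rw [predC_iff_counts sa sb M x hsa hsb] at hpx
  rw [hA, hB] at hpx
  exact hpx

theorem solve_eq_main (M : Int) (sa sb : List Int)
    (hsa : sa.Pairwise (· ≤ ·)) (hsb : sb.Pairwise (· ≤ ·)) :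
    solveLoop sa sb M 1 (10 ^ 9 + 1) 0 =
      sweep (PySem.List.sorted
        (PySem.Set.ofList ((1 :: (sa ++ sb.map (fun b => b + 1))).filter
          (fun y => decide (1 ≤ y) && decide (y ≤ (10 ^ 9 + 1 : Int))))) (fun y => y) false)
        sa sb 0 M := by
  set H : Int := 10 ^ 9 + 1 with hHdef
  set L : List Int := (1 :: (sa ++ sb.map (fun b => b + 1))).filter
      (fun y => decide (1 ≤ y) && decide (y ≤ H)) with hLdef
  set cands : List Int := PySem.List.sorted (PySem.Set.ofList L) (fun y => y) false with hCdef
  have hcands_lt : cands.Pairwise (· < ·) := PySem.List.sorted_ofList_pairwise_lt L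
  have hcands_le : cands.Pairwise (· ≤ ·) := hcands_lt.imp le_of_lt
  have hbounds : ∀ c ∈ cands, 1 ≤ c ∧ c ≤ H := by
    intro c hc
    rw [hCdef, PySem.List.mem_sorted, PySem.Set.mem_ofList, hLdef, List.mem_filter] at hc
    have := hc.2
    simp at this
    exact this
  have hsweep := sweep_eq_find
    (fun c => (sa.countP (fun a => decide (a ≤ c)) : Int))
    (fun c => M - (sb.countP (fun b => decide (b < c)) : Int))
    cands sa sb 0 M hsa hsb hcands_le (by intro c _; simp) (by intro c _; rfl)
  have bridge : ∀ c : Int,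
      (decide ((fun c => M - (sb.countP (fun b => decide (b < c)) : Int)) c ≤
        (fun c => (sa.countP (fun a => decide (a ≤ c)) : Int)) c) = true) ↔ predC sa sb M c := by
    intro c
    rw [predC_iff_counts sa sb M c hsa hsb]
    simp
  have hH1 : (1:Int) ≤ H := by rw [hHdef]; norm_num
  by_cases hH : predC sa sb M H
  · obtain ⟨h1, h2, h3, h4⟩ := solveLoop_found sa sb M hsa hsb 1 H 0 hH1 hH
    obtain ⟨c, hc_mem, hc_le, hc_pred⟩ := reduction M sa sb hsa hsb _ h1 h2 h3
    rw [hsweep]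
    cases hfind : cands.find? (fun c => decide (M - (sb.countP (fun b => decide (b < c)) : Int) ≤
        (sa.countP (fun a => decide (a ≤ c)) : Int))) with
    | none =>
      exfalso
      have := List.find?_eq_none.1 hfind c hc_mem
      exact this ((bridge c).2 hc_pred)
    | some r' =>
      obtain ⟨hpr', hr'mem, hr'min⟩ := find?_first_min _ cands hcands_le r' hfind
      have hr'pred : predC sa sb M r' := (bridge r').1 hpr'
      obtain ⟨hr'1, hr'H⟩ := hbounds r' hr'mem
      have hge : solveLoop sa sb M 1 H 0 ≤ r' := by
        by_contra hlt
        exact h4 r' hr'1 (by omega) hr'pred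
      have hle : r' ≤ c := hr'min c hc_mem ((bridge c).2 hc_pred)
      have heq : r' = solveLoop sa sb M 1 H 0 := le_antisymm (le_trans hle hc_le) hge
      simp [heq]
  · have hall : ∀ x, 1 ≤ x → x ≤ H → ¬ predC sa sb M x := by
      intro x hx1 hx2 hpx
      exact hH (predC_mono sa sb M x H hsa hsb hx2 hpx)
    rw [solveLoop_none sa sb M 1 H 0 hall, hsweep]
    have hnone : cands.find? (fun c => decide (M - (sb.countP (fun b => decide (b < c)) : Int) ≤
        (sa.countP (fun a => decide (a ≤ c)) : Int))) = none := by
      rw [List.find?_eq_none]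
      intro c hc
      obtain ⟨hc1, hcH⟩ := hbounds c hc
      have hnp := hall c hc1 hcH
      exact fun h => hnp ((bridge c).1 h)
    rw [hnone]
    rfl

-- ===== VERDICT (by name: the statement is the Claim_ definition above) =====
theorem solve_spec : Claim_equal_solve := by
  intro N M A B _
  show solve N M A B = solve_alt N M A B
  have hsa : (PySem.List.sorted A (fun x => x) false).Pairwise (· ≤ ·) := by
    simpa using PySem.List.sorted_pairwise A (fun x => x)
  have hsb : (PySem.List.sorted B (fun x => x) false).Pairwise (· ≤ ·) := by
    simpa using PySem.List.sorted_pairwise B (fun x => x)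
  simp only [solve, solve_alt]
  exact solve_eq_main M _ _ hsa hsb
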